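-- pv_equiv track=rewrite | github.com/kimjune01/june.kim | worklog/h5b_healability.py | find_minimum_spanner_brute
-- ===== SOURCE A (Python) =====
-- import itertools
--
-- def compute_reachability(k, edge_set, M):
--     """
--     All-pairs temporal reachability in K_{k,k}.
--     Vertices: a_i = i, b_j = k+j. Edge (i,j) has timestamp M[i][j].
--     Strictly increasing timestamps for journeys (all timestamps distinct).
--     """
--     n = 2 * k
--     sorted_edges = sorted([(M[i][j], i, k + j) for (i, j) in edge_set])
--
--     can_reach = [dict() for _ in range(n)]
--     for v in range(n):
--         can_reach[v][v] = 0
--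
--     for (t, a, b) in sorted_edges:
--         new_b = {s: t for s, at in can_reach[a].items()
--                  if at < t and (s not in can_reach[b] or t < can_reach[b][s])}
--         new_a = {s: t for s, at in can_reach[b].items()
--                  if at < t and (s not in can_reach[a] or t < can_reach[a][s])}
--         can_reach[b].update(new_b)
--         can_reach[a].update(new_a)
--
--     reachable = set()
--     for v in range(n):
--         for src in can_reach[v]:
--             if src != v:
--                 reachable.add((src, v))
--     return reachable
--
-- def full_reachability(k, M):
--     all_edges = set((i, j) for i in range(k) for j in range(k))
--     return compute_reachability(k, all_edges, M)
--
-- def find_minimum_spanner_brute(k, M):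
--     full_reach = full_reachability(k, M)
--     all_edges = [(i, j) for i in range(k) for j in range(k)]
--     for size in range(1, k * k + 1):
--         for combo in itertools.combinations(all_edges, size):
--             if compute_reachability(k, set(combo), M) == full_reach:
--                 return set(combo), full_reach
--     return set(all_edges), full_reach
-- ===== SOURCE B (Python) =====
-- import itertools
--
-- def _reach_flat(k, edge_set, M):
--     """Temporal reachability via ONE flat dict keyed by (vertex, source) ->
--     earliest arrival, scanned whole per edge, instead of a list of per-vertex
--     source-keyed dicts."""
--     n = 2 * k
--     D = {(v, v): 0 for v in range(n)}
--     for (t, a, b) in sorted((M[i][j], i, k + j) for (i, j) in edge_set):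
--         adds = []
--         for ((w, s), at) in D.items():
--             if w == a and at < t and ((b, s) not in D or t < D[(b, s)]):
--                 adds.append(((b, s), t))
--             if w == b and at < t and ((a, s) not in D or t < D[(a, s)]):
--                 adds.append(((a, s), t))
--         D.update(adds)
--     reach = set()
--     for v in range(n):
--         for (w, s) in D:
--             if w == v and s != v:
--                 reach.add((s, v))
--     return reach
--
-- def find_minimum_spanner_brute(k, M):
--     all_edges = [(i, j) for i in range(k) for j in range(k)]
--     full = _reach_flat(k, set(all_edges), M)
--     hit = next((c for size in range(1, k * k + 1)
--                   for c in itertools.combinations(all_edges, size)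
--                   if _reach_flat(k, set(c), M) == full), None)
--     if hit is None:
--         return set(all_edges), full
--     return set(hit), full
-- ===== Notes on version B (the rewrite author's own statement) =====
-- stated objective: alternative
-- what changed: The reachability core keeps one flat dict keyed by (vertex, source) and scans it once per edge (merging the two per-edge relaxation comprehensions into a single pass), instead of a list of per-vertex source-keyed dicts indexed at the edge endpoints; the size-increasing combination search is flattened into one candidate stream consumed by next().
import Mathlib
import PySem

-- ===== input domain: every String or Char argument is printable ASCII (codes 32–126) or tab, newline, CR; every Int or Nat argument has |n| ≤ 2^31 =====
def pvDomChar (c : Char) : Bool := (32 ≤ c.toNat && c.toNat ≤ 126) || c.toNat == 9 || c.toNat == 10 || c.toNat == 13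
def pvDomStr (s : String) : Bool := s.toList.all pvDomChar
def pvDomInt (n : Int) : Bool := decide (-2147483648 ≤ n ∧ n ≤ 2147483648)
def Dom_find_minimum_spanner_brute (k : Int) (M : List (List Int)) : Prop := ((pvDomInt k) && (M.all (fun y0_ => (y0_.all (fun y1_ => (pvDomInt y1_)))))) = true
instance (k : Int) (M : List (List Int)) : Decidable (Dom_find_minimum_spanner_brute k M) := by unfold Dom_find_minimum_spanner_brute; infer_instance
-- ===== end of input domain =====

-- B replaces A's list of per-vertex source-keyed dicts in the reachability core by ONE flat
-- dict keyed by (vertex, source) scanned whole once per edge (the two per-edge relaxation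
-- comprehensions merged into a single pass), and flattens the size-increasing combination
-- search into a single candidate stream; an alternative decomposition, same values.

-- Shared helpers: both Pythons call itertools.combinations (ported once, the standard
-- recursive expansion in itertools' documented order) and contain the identical source
-- lines building all_edges and the sorted edge-triple list.
def pyCombinations {α : Type} : List α → Nat → List (List α)
  | _, 0 => [[]]
  | [], _ + 1 => []
  | x :: xs, r + 1 => (pyCombinations xs r).map (fun c => x :: c) ++ pyCombinations xs (r + 1)

-- Python compares int triples lexicographically
def triKey (p : Int × Int × Int) : Lex (Int × Lex (Int × Int)) := toLex (p.1, toLex (p.2.1, p.2.2))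

def allEdgesList (k : Int) : List (Int × Int) :=
  (PySem.List.pyRange 0 k).flatMap (fun i => (PySem.List.pyRange 0 k).map (fun j => (i, j)))

-- sorted([(M[i][j], i, k+j) for (i,j) in edge_set]): the triples are pairwise distinct
-- (distinct (i, k+j) parts), so the sort result is independent of the Python set's iteration
-- order and mapping over the Set's list representation is exact.
def sortedTriples (k : Int) (M : List (List Int)) (edge_set : List (Int × Int)) : List (Int × Int × Int) :=
  PySem.List.sorted (edge_set.map (fun e =>
    (PySem.List.pyGetD (PySem.List.pyGetD M e.1 []) e.2 0, e.1, k + e.2))) triKey false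

-- ===== PORT A =====
def compute_reachability (k : Int) (edge_set : List (Int × Int)) (M : List (List Int)) : List (Int × Int) :=
  let n := 2 * k
  let sorted_edges := sortedTriples k M edge_set
  let cr0 : List (PySem.Dict Int Int) := (PySem.List.pyRange 0 n).map (fun _ => PySem.Dict.empty)
  let cr1 := (PySem.List.pyRange 0 n).foldl (fun cr v =>
    PySem.List.pySetD cr v (PySem.Dict.insert (PySem.List.pyGetD cr v PySem.Dict.empty) v 0)) cr0
  let cr2 := sorted_edges.foldl (fun cr e =>
    let t := e.1; let a := e.2.1; let b := e.2.2
    let cra := PySem.List.pyGetD cr a PySem.Dict.empty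
    let crb := PySem.List.pyGetD cr b PySem.Dict.empty
    let new_b := (cra.items.filter (fun p =>
      decide (p.2 < t) && (!(crb.contains p.1) || decide (t < crb.getD p.1 0)))).map (fun p => (p.1, t))
    let new_a := (crb.items.filter (fun p =>
      decide (p.2 < t) && (!(cra.contains p.1) || decide (t < cra.getD p.1 0)))).map (fun p => (p.1, t))
    let cr' := PySem.List.pySetD cr b (PySem.Dict.update crb new_b)
    PySem.List.pySetD cr' a (PySem.Dict.update (PySem.List.pyGetD cr' a PySem.Dict.empty) new_a)) cr1
  (PySem.List.pyRange 0 n).foldl (fun acc v =>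
    ((PySem.List.pyGetD cr2 v PySem.Dict.empty).keys).foldl (fun acc src =>
      if src != v then PySem.Set.add acc (src, v) else acc) acc) PySem.Set.empty

def full_reachability (k : Int) (M : List (List Int)) : List (Int × Int) :=
  compute_reachability k (PySem.Set.ofList (allEdgesList k)) M

def find_minimum_spanner_brute (k : Int) (M : List (List Int)) : (List (Int × Int)) × (List (Int × Int)) :=
  let full_reach := full_reachability k M
  let all_edges := allEdgesList k
  match (PySem.List.pyRange 1 (k * k + 1)).findSome? (fun size =>
      (pyCombinations all_edges size.toNat).find? (fun combo =>
        PySem.Set.equal (compute_reachability k (PySem.Set.ofList combo) M) full_reach)) with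
  | some combo => (PySem.Set.ofList combo, full_reach)
  | none => (PySem.Set.ofList all_edges, full_reach)

-- ===== PORT B =====
def reach_flat (k : Int) (edge_set : List (Int × Int)) (M : List (List Int)) : List (Int × Int) :=
  let n := 2 * k
  let D0 : PySem.Dict (Int × Int) Int := PySem.Dict.mk ((PySem.List.pyRange 0 n).map (fun v => ((v, v), (0 : Int))))
  let D := (sortedTriples k M edge_set).foldl (fun D e =>
    let t := e.1; let a := e.2.1; let b := e.2.2
    let adds := D.items.foldl (fun acc it =>
      let acc2 := if it.1.1 == a && decide (it.2 < t) &&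
          (!(D.contains (b, it.1.2)) || decide (t < D.getD (b, it.1.2) 0)) then acc ++ [((b, it.1.2), t)] else acc
      if it.1.1 == b && decide (it.2 < t) &&
          (!(D.contains (a, it.1.2)) || decide (t < D.getD (a, it.1.2) 0)) then acc2 ++ [((a, it.1.2), t)] else acc2)
      ([] : List ((Int × Int) × Int))
    PySem.Dict.update D adds) D0
  (PySem.List.pyRange 0 n).foldl (fun acc v =>
    D.keys.foldl (fun acc ws =>
      if ws.1 == v && ws.2 != v then PySem.Set.add acc (ws.2, v) else acc) acc) PySem.Set.empty

def find_minimum_spanner_brute_alt (k : Int) (M : List (List Int)) : (List (Int × Int)) × (List (Int × Int)) :=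
  let all_edges := allEdgesList k
  let full := reach_flat k (PySem.Set.ofList all_edges) M
  match ((PySem.List.pyRange 1 (k * k + 1)).flatMap (fun size => pyCombinations all_edges size.toNat)).find?
      (fun c => PySem.Set.equal (reach_flat k (PySem.Set.ofList c) M) full) with
  | some c => (PySem.Set.ofList c, full)
  | none => (PySem.Set.ofList all_edges, full)

-- ===== PRECONDITION & SPEC =====
-- Pre_ excludes exactly the inputs on which Python A raises IndexError while indexing
-- M[i][j] for i, j in range(k): M must have at least k rows whose first k rows have length ≥ k.
def Pre_find_minimum_spanner_brute (k : Int) (M : List (List Int)) : Prop :=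
  k.toNat ≤ M.length ∧ ∀ r ∈ M.take k.toNat, k.toNat ≤ r.length
instance (k : Int) (M : List (List Int)) : Decidable (Pre_find_minimum_spanner_brute k M) := by
  unfold Pre_find_minimum_spanner_brute; infer_instance
def pvWitness_find_minimum_spanner_brute : Int × List (List Int) := (2, [[3, 1], [0, 2]])

def Spec_find_minimum_spanner_brute (k : Int) (M : List (List Int)) (out : (List (Int × Int)) × (List (Int × Int))) : Prop := out = find_minimum_spanner_brute_alt k M
instance (k : Int) (M : List (List Int)) (out : (List (Int × Int)) × (List (Int × Int))) : Decidable (Spec_find_minimum_spanner_brute k M out) := by unfold Spec_find_minimum_spanner_brute; infer_instance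

-- ===== CLAIM (what is proved, stated in full; the proofs are below) =====
def Claim_equal_find_minimum_spanner_brute : Prop := ∀ (k : Int) (M : List (List Int)), Dom_find_minimum_spanner_brute k M → Pre_find_minimum_spanner_brute k M → Spec_find_minimum_spanner_brute k M (find_minimum_spanner_brute k M)

-- ===== LEMMAS AND PROOFS =====

-- projection of the flat dict's items onto one vertex: its source-keyed association list
def projD (v : Int) (L : List ((Int × Int) × Int)) : List (Int × Int) :=
  (L.filter (fun p => p.1.1 == v)).map (fun p => (p.1.2, p.2))

def InvCR (n : Int) (cr : List (PySem.Dict Int Int)) (D : PySem.Dict (Int × Int) Int) : Prop :=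
  cr.length = n.toNat ∧ D.keys.Nodup ∧
    ∀ v : Int, 0 ≤ v → projD v D.items = (PySem.List.pyGetD cr v PySem.Dict.empty).items

-- named forms of the two ports' loop bodies (definitionally equal to the inline lambdas)
def initF (cr : List (PySem.Dict Int Int)) (v : Int) : List (PySem.Dict Int Int) :=
  PySem.List.pySetD cr v (PySem.Dict.insert (PySem.List.pyGetD cr v PySem.Dict.empty) v 0)

def stepA (cr : List (PySem.Dict Int Int)) (e : Int × Int × Int) : List (PySem.Dict Int Int) :=
  let t := e.1; let a := e.2.1; let b := e.2.2
  let cra := PySem.List.pyGetD cr a PySem.Dict.empty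
  let crb := PySem.List.pyGetD cr b PySem.Dict.empty
  let new_b := (cra.items.filter (fun p =>
    decide (p.2 < t) && (!(crb.contains p.1) || decide (t < crb.getD p.1 0)))).map (fun p => (p.1, t))
  let new_a := (crb.items.filter (fun p =>
    decide (p.2 < t) && (!(cra.contains p.1) || decide (t < cra.getD p.1 0)))).map (fun p => (p.1, t))
  let cr' := PySem.List.pySetD cr b (PySem.Dict.update crb new_b)
  PySem.List.pySetD cr' a (PySem.Dict.update (PySem.List.pyGetD cr' a PySem.Dict.empty) new_a)

def stepB (D : PySem.Dict (Int × Int) Int) (e : Int × Int × Int) : PySem.Dict (Int × Int) Int :=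
  let t := e.1; let a := e.2.1; let b := e.2.2
  let adds := D.items.foldl (fun acc it =>
    let acc2 := if it.1.1 == a && decide (it.2 < t) &&
        (!(D.contains (b, it.1.2)) || decide (t < D.getD (b, it.1.2) 0)) then acc ++ [((b, it.1.2), t)] else acc
    if it.1.1 == b && decide (it.2 < t) &&
        (!(D.contains (a, it.1.2)) || decide (t < D.getD (a, it.1.2) 0)) then acc2 ++ [((a, it.1.2), t)] else acc2)
    ([] : List ((Int × Int) × Int))
  PySem.Dict.update D adds

def collectA (n : Int) (cr : List (PySem.Dict Int Int)) : List (Int × Int) :=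
  (PySem.List.pyRange 0 n).foldl (fun acc v =>
    ((PySem.List.pyGetD cr v PySem.Dict.empty).keys).foldl (fun acc src =>
      if src != v then PySem.Set.add acc (src, v) else acc) acc) PySem.Set.empty

def collectB (n : Int) (D : PySem.Dict (Int × Int) Int) : List (Int × Int) :=
  (PySem.List.pyRange 0 n).foldl (fun acc v =>
    D.keys.foldl (fun acc ws =>
      if ws.1 == v && ws.2 != v then PySem.Set.add acc (ws.2, v) else acc) acc) PySem.Set.empty

theorem projD_cons (v : Int) (p : (Int × Int) × Int) (L : List ((Int × Int) × Int)) :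
    projD v (p :: L) = (if p.1.1 = v then [(p.1.2, p.2)] else []) ++ projD v L := by
  by_cases h : p.1.1 = v <;> simp [projD, h]

theorem projD_append (v : Int) (L L' : List ((Int × Int) × Int)) :
    projD v (L ++ L') = projD v L ++ projD v L' := by
  simp [projD]

theorem projD_mapRep (L : List ((Int × Int) × Int)) (v w s t : Int) :
    projD v (L.map (fun p => if p.1 == (w, s) then ((w, s), t) else p)) =
      if w = v then (projD v L).map (fun q => if q.1 == s then (s, t) else q) else projD v L := by
  induction L with
  | nil => by_cases hw : w = v <;> simp [projD, hw]
  | cons p L ih =>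
    obtain ⟨⟨w', s'⟩, u⟩ := p
    by_cases hww : w' = w <;> by_cases hss : s' = s <;> by_cases hwv : w = v <;>
      simp_all [List.map_cons, projD_cons, Prod.ext_iff]

theorem get?_projD (L : List ((Int × Int) × Int)) (v s : Int) :
    (PySem.Dict.mk L).get? (v, s) = (PySem.Dict.mk (projD v L)).get? s := by
  induction L with
  | nil => rfl
  | cons p L ih =>
    obtain ⟨⟨w, s'⟩, u⟩ := p
    rw [PySem.Dict.get?_mk_cons, projD_cons]
    by_cases hw : w = v
    · by_cases hs : s' = s
      · simp [hw, hs, PySem.Dict.get?_mk_cons]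
      · simp [hw, hs, PySem.Dict.get?_mk_cons, ih]
    · simp [hw, ih, Prod.ext_iff]

theorem contains_projD (L : List ((Int × Int) × Int)) (v s : Int) :
    (PySem.Dict.mk L).contains (v, s) = (PySem.Dict.mk (projD v L)).contains s := by
  rw [PySem.Dict.contains_eq_isSome_get?, PySem.Dict.contains_eq_isSome_get?, get?_projD]

theorem getD_projD (L : List ((Int × Int) × Int)) (v s d : Int) :
    (PySem.Dict.mk L).getD (v, s) d = (PySem.Dict.mk (projD v L)).getD s d := by
  rw [PySem.Dict.getD_eq_get?_getD, PySem.Dict.getD_eq_get?_getD, get?_projD]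

theorem projD_insert (L : List ((Int × Int) × Int)) (v w s t : Int) :
    projD v ((PySem.Dict.mk L).insert (w, s) t).items =
      (if w = v then ((PySem.Dict.mk (projD v L)).insert s t).items else projD v L) := by
  unfold PySem.Dict.insert
  by_cases hc : (PySem.Dict.mk L).contains (w, s)
  · rw [if_pos hc]
    by_cases hw : w = v
    · have hc' : (PySem.Dict.mk (projD v L)).contains s := by
        rw [← hw, ← contains_projD]; exact hc
      rw [if_pos hw, if_pos hc']
      simpa [hw] using projD_mapRep L v w s t
    · rw [if_neg hw]
      simpa [hw] using projD_mapRep L v w s t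
  · rw [if_neg hc]
    by_cases hw : w = v
    · have hc' : ¬ (PySem.Dict.mk (projD v L)).contains s := by
        rw [← hw, ← contains_projD]; simpa using hc
      rw [if_pos hw, if_neg (by simpa using hc')]
      show projD v (L ++ [((w, s), t)]) = projD v L ++ [(s, t)]
      simp [projD, hw]
    · rw [if_neg hw]
      show projD v (L ++ [((w, s), t)]) = projD v L
      simp [projD, hw]

theorem projD_update (adds : List ((Int × Int) × Int)) :
    ∀ (L : List ((Int × Int) × Int)) (v : Int),
      projD v ((PySem.Dict.mk L).update adds).items =
        ((PySem.Dict.mk (projD v L)).update (projD v adds)).items := by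
  induction adds with
  | nil => intro L v; rfl
  | cons x rest ih =>
    intro L v
    obtain ⟨⟨w, s⟩, t⟩ := x
    have h1 : (PySem.Dict.mk L).update (((w, s), t) :: rest)
        = ((PySem.Dict.mk L).insert (w, s) t).update rest := rfl
    rw [h1, projD_cons]
    have h2 : ((PySem.Dict.mk L).insert (w, s) t)
        = PySem.Dict.mk (((PySem.Dict.mk L).insert (w, s) t).items) := rfl
    rw [h2, ih, projD_insert]
    by_cases hw : w = v
    · rw [if_pos hw, if_pos (by simpa using hw)]
      congr 1
    · rw [if_neg hw, if_neg (by simpa using hw)]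
      simp

theorem projD_flatMap (v : Int) (g : ((Int × Int) × Int) → List ((Int × Int) × Int))
    (L : List ((Int × Int) × Int)) :
    projD v (L.flatMap g) = L.flatMap (fun it => projD v (g it)) := by
  induction L with
  | nil => rfl
  | cons p L ih => simp [List.flatMap_cons, projD_append, ih]

theorem flatMap_ite_singleton {α β : Type} (p : α → Bool) (f : α → β) (l : List α) :
    l.flatMap (fun x => if p x then [f x] else []) = (l.filter p).map f := by
  induction l with
  | nil => rfl
  | cons x xs ih =>
    by_cases hx : p x <;> simp [List.flatMap_cons, hx, ih]

theorem pyRange_neg_nil (n : Int) (h : n < 0) : PySem.List.pyRange 0 n = [] := by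
  apply List.eq_nil_iff_forall_not_mem.2
  intro x hx
  have := (PySem.List.mem_pyRange_one).1 hx
  omega

theorem nodup_pyRange (n : Int) : (PySem.List.pyRange 0 n).Nodup := by
  by_cases h : 0 ≤ n
  · obtain ⟨m, rfl⟩ := Int.eq_ofNat_of_zero_le h
    rw [PySem.List.pyRange_zero_natCast]
    exact List.nodup_range.map (fun a b => by omega)
  · rw [pyRange_neg_nil n (by omega)]; exact List.nodup_nil

theorem length_pyRange (n : Int) : (PySem.List.pyRange 0 n).length = n.toNat := by
  by_cases h : 0 ≤ n
  · obtain ⟨m, rfl⟩ := Int.eq_ofNat_of_zero_le h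
    rw [PySem.List.pyRange_zero_natCast]; simp
  · rw [pyRange_neg_nil n (by omega)]; simp; omega

theorem filter_eq_singleton {l : List Int} (hl : l.Nodup) (v : Int) :
    l.filter (fun u => u == v) = if v ∈ l then [v] else [] := by
  induction l with
  | nil => simp
  | cons x xs ih =>
    rcases List.nodup_cons.1 hl with ⟨hx, hxs⟩
    by_cases hv : x = v
    · subst hv
      simp [ih hxs, hx]
    · simp [hv, ih hxs, Ne.symm hv]

theorem insert_empty (v : Int) :
    PySem.Dict.insert (PySem.Dict.empty : PySem.Dict Int Int) v 0 = PySem.Dict.mk [(v, 0)] := rfl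

theorem init_aux (N : Nat) :
    ∀ (m : Nat), m ≤ N →
      (List.range m).foldl (fun cr (u : Nat) => initF cr (u : Int))
          ((List.range N).map (fun _ => (PySem.Dict.empty : PySem.Dict Int Int)))
        = (List.range N).map (fun u : Nat => if u < m then PySem.Dict.mk [((u : Int), 0)] else PySem.Dict.empty) := by
  intro m
  induction m with
  | zero => intro _; simp
  | succ m ih =>
    intro hm
    rw [List.range_succ, List.foldl_append, ih (by omega)]
    simp only [List.foldl_cons, List.foldl_nil]
    unfold initF
    rw [PySem.List.pyGetD_of_nonneg _ _ (by positivity), PySem.List.pySetD_of_nonneg _ _ (by positivity)]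
    simp only [Int.toNat_natCast]
    apply List.ext_getElem
    · simp
    · intro i h1 h2
      simp only [List.getElem_set, List.getElem_map, List.getElem_range]
      rcases Nat.lt_trichotomy i m with hlt | rfl | hgt
      · rw [if_neg (by omega), if_pos hlt, if_pos (by omega)]
      · rw [if_pos rfl]
        rw [List.getD_eq_getElem?_getD, List.getElem?_map, List.getElem?_range (show i < N by omega)]
        simp only [Option.map_some, Option.getD_some]
        rw [if_neg (lt_irrefl i), insert_empty, if_pos (by omega)]
      · rw [if_neg (by omega), if_neg (by omega), if_neg (by omega)]

theorem init_cr (n : Int) :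
    (PySem.List.pyRange 0 n).foldl initF ((PySem.List.pyRange 0 n).map (fun _ => (PySem.Dict.empty : PySem.Dict Int Int)))
      = (PySem.List.pyRange 0 n).map (fun v => PySem.Dict.mk [(v, 0)]) := by
  by_cases h : 0 ≤ n
  · obtain ⟨N, rfl⟩ := Int.eq_ofNat_of_zero_le h
    rw [PySem.List.pyRange_zero_natCast, List.foldl_map, List.map_map, List.map_map]
    have h2 := init_aux N N le_rfl
    rw [show ((List.range N).map ((fun _ => (PySem.Dict.empty : PySem.Dict Int Int)) ∘ (fun k : Nat => (k : Int)))) = ((List.range N).map (fun _ => (PySem.Dict.empty : PySem.Dict Int Int))) from rfl]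
    rw [h2]
    apply List.map_congr_left
    intro u hu
    rw [if_pos (List.mem_range.1 hu)]
    rfl
  · rw [pyRange_neg_nil n (by omega)]; rfl

theorem init_inv (n : Int) :
    InvCR n ((PySem.List.pyRange 0 n).map (fun v => PySem.Dict.mk [(v, 0)]))
      (PySem.Dict.mk ((PySem.List.pyRange 0 n).map (fun v => ((v, v), (0 : Int))))) := by
  refine ⟨by rw [List.length_map, length_pyRange], ?_, ?_⟩
  · rw [PySem.Dict.keys_mk, List.map_map]
    exact (nodup_pyRange n).map (fun a b h => by simpa [Prod.ext_iff] using h)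
  · intro v hv
    show projD v ((PySem.List.pyRange 0 n).map (fun v => ((v, v), (0 : Int))))
        = (PySem.List.pyGetD ((PySem.List.pyRange 0 n).map (fun v => PySem.Dict.mk [(v, 0)])) v PySem.Dict.empty).items
    have hL : projD v ((PySem.List.pyRange 0 n).map (fun v => ((v, v), (0 : Int))))
        = if v ∈ PySem.List.pyRange 0 n then [(v, 0)] else [] := by
      unfold projD
      rw [List.filter_map]
      have : ((fun p : (Int × Int) × Int => p.1.1 == v) ∘ (fun v : Int => ((v, v), (0 : Int)))) = (fun u : Int => u == v) := rfl
      rw [this, filter_eq_singleton (nodup_pyRange n) v]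
      by_cases hm : v ∈ PySem.List.pyRange 0 n <;> simp [hm]
    rw [hL, PySem.List.pyGetD_of_nonneg _ _ hv]
    by_cases hm : v ∈ PySem.List.pyRange 0 n
    · rw [if_pos hm]
      have hb := (PySem.List.mem_pyRange_one).1 hm
      obtain ⟨N, rfl⟩ := Int.eq_ofNat_of_zero_le (le_trans hv (le_of_lt hb.2))
      rw [PySem.List.pyRange_zero_natCast, List.map_map]
      rw [List.getD_eq_getElem?_getD, List.getElem?_map, List.getElem?_range (by omega : v.toNat < N)]
      simp only [Option.map_some, Option.getD_some, Function.comp_apply]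
      rw [show ((v.toNat : Int)) = v by omega]
    · rw [if_neg hm]
      have hb : ¬ (v < n) := fun hlt => hm ((PySem.List.mem_pyRange_one).2 ⟨hv, hlt⟩)
      rw [List.getD_eq_getElem?_getD, List.getElem?_eq_none]
      · rfl
      · rw [List.length_map, length_pyRange]; omega

theorem getD_set_set_fst {α : Type} (cr : List α) (i j : Nat) (x y : α) (d : α)
    (hij : j ≠ i) (hi : i < cr.length) : ((cr.set i x).set j y).getD i d = x := by
  rw [List.getD_eq_getElem?_getD, List.getElem?_set_ne hij, List.getElem?_set_self (by simpa using hi)]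
  rfl

theorem getD_set_set_other {α : Type} (cr : List α) (i j v : Nat) (x y : α) (d : α)
    (hvi : v ≠ i) (hvj : v ≠ j) : ((cr.set i x).set j y).getD v d = cr.getD v d := by
  rw [List.getD_eq_getElem?_getD, List.getElem?_set_ne (fun h => hvj h.symm),
    List.getElem?_set_ne (fun h => hvi h.symm), List.getD_eq_getElem?_getD]

theorem step_inv (n : Int) (cr : List (PySem.Dict Int Int)) (D : PySem.Dict (Int × Int) Int)
    (t a b : Int) (h : InvCR n cr D) (ha0 : 0 ≤ a) (ha1 : a < n) (hb0 : 0 ≤ b) (hb1 : b < n)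
    (hab : a ≠ b) : InvCR n (stepA cr (t, a, b)) (stepB D (t, a, b)) := by
  obtain ⟨hlen, hnd, hproj⟩ := h
  -- transfer of membership / lookup through the flat dict
  have hDc : ∀ (w s : Int), 0 ≤ w →
      D.contains (w, s) = (PySem.List.pyGetD cr w PySem.Dict.empty).contains s := by
    intro w s hw
    show (PySem.Dict.mk D.items).contains (w, s) = _
    rw [contains_projD, hproj w hw]
  have hDg : ∀ (w s d : Int), 0 ≤ w →
      D.getD (w, s) d = (PySem.List.pyGetD cr w PySem.Dict.empty).getD s d := by
    intro w s d hw
    show (PySem.Dict.mk D.items).getD (w, s) d = _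
    rw [getD_projD, hproj w hw]
  -- the two sides' per-edge quantities
  set cra := PySem.List.pyGetD cr a PySem.Dict.empty with hcra
  set crb := PySem.List.pyGetD cr b PySem.Dict.empty with hcrb
  set Qb : ((Int × Int) × Int) → Bool := fun it =>
    decide (it.2 < t) && (!(crb.contains it.1.2) || decide (t < crb.getD it.1.2 0)) with hQb
  set Qa : ((Int × Int) × Int) → Bool := fun it =>
    decide (it.2 < t) && (!(cra.contains it.1.2) || decide (t < cra.getD it.1.2 0)) with hQa
  set C1 : ((Int × Int) × Int) → Bool := fun it => it.1.1 == a && decide (it.2 < t) &&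
    (!(D.contains (b, it.1.2)) || decide (t < D.getD (b, it.1.2) 0)) with hC1
  set C2 : ((Int × Int) × Int) → Bool := fun it => it.1.1 == b && decide (it.2 < t) &&
    (!(D.contains (a, it.1.2)) || decide (t < D.getD (a, it.1.2) 0)) with hC2
  set g : ((Int × Int) × Int) → List ((Int × Int) × Int) := fun it =>
    (if C1 it then [((b, it.1.2), t)] else []) ++ (if C2 it then [((a, it.1.2), t)] else []) with hg
  set new_b := (cra.items.filter (fun p =>
    decide (p.2 < t) && (!(crb.contains p.1) || decide (t < crb.getD p.1 0)))).map (fun p => (p.1, t)) with hnew_b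
  set new_a := (crb.items.filter (fun p =>
    decide (p.2 < t) && (!(cra.contains p.1) || decide (t < cra.getD p.1 0)))).map (fun p => (p.1, t)) with hnew_a
  have hC1Q : ∀ it, C1 it = (Qb it && (it.1.1 == a)) := by
    intro it
    rw [hC1, hQb]
    simp only [hDc b it.1.2 hb0, hDg b it.1.2 0 hb0, ← hcrb]
    rw [Bool.and_assoc, Bool.and_comm]
  have hC2Q : ∀ it, C2 it = (Qa it && (it.1.1 == b)) := by
    intro it
    rw [hC2, hQa]
    simp only [hDc a it.1.2 ha0, hDg a it.1.2 0 ha0, ← hcra]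
    rw [Bool.and_assoc, Bool.and_comm]
  -- the adds list built by B's scan
  have hadds : D.items.foldl (fun acc it =>
      let acc2 := if it.1.1 == a && decide (it.2 < t) &&
          (!(D.contains (b, it.1.2)) || decide (t < D.getD (b, it.1.2) 0)) then acc ++ [((b, it.1.2), t)] else acc
      if it.1.1 == b && decide (it.2 < t) &&
          (!(D.contains (a, it.1.2)) || decide (t < D.getD (a, it.1.2) 0)) then acc2 ++ [((a, it.1.2), t)] else acc2)
      ([] : List ((Int × Int) × Int)) = D.items.flatMap g := by
    rw [PySem.List.foldl_congr_mem D.items _ (fun acc it => acc ++ g it) []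
      (fun acc it _ => by
        show (let acc2 := if C1 it then acc ++ [((b, it.1.2), t)] else acc;
          if C2 it then acc2 ++ [((a, it.1.2), t)] else acc2) = acc ++ g it
        rw [hg]
        by_cases h1 : C1 it <;> by_cases h2 : C2 it <;> simp [h1, h2])]
    rw [PySem.List.foldl_append_eq_flatMap, List.nil_append]
  -- projections of adds
  have hprojb : projD b (D.items.flatMap g) = new_b := by
    rw [projD_flatMap]
    have h1 : ∀ it ∈ D.items, projD b (g it) = (if C1 it then [(it.1.2, t)] else []) := by
      intro it _
      rw [hg]
      by_cases h1 : C1 it <;> by_cases h2 : C2 it <;>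
        simp [h1, h2, projD, hab]
    rw [List.flatMap_congr h1, flatMap_ite_singleton]
    rw [List.filter_congr (fun it _ => hC1Q it), ← List.filter_filter]
    rw [hnew_b]
    rw [show cra.items = projD a D.items from (hproj a ha0).symm]
    unfold projD
    rw [List.filter_map, List.map_map]
    rfl
  have hproja : projD a (D.items.flatMap g) = new_a := by
    rw [projD_flatMap]
    have h1 : ∀ it ∈ D.items, projD a (g it) = (if C2 it then [(it.1.2, t)] else []) := by
      intro it _
      rw [hg]
      by_cases h1 : C1 it <;> by_cases h2 : C2 it <;>
        simp [h1, h2, projD, Ne.symm hab]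
    rw [List.flatMap_congr h1, flatMap_ite_singleton]
    rw [List.filter_congr (fun it _ => hC2Q it), ← List.filter_filter]
    rw [hnew_a]
    rw [show crb.items = projD b D.items from (hproj b hb0).symm]
    unfold projD
    rw [List.filter_map, List.map_map]
    rfl
  have hprojo : ∀ v : Int, v ≠ a → v ≠ b → projD v (D.items.flatMap g) = [] := by
    intro v hva hvb
    rw [projD_flatMap]
    have h1 : ∀ it ∈ D.items, projD v (g it) = [] := by
      intro it _
      rw [hg]
      by_cases h1 : C1 it <;> by_cases h2 : C2 it <;>
        simp [h1, h2, projD, Ne.symm hva, Ne.symm hvb]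
    rw [List.flatMap_congr h1]
    simp
  -- unfold the two step results
  have hton : a.toNat ≠ b.toNat := by omega
  have hbn : b.toNat < cr.length := by rw [hlen]; omega
  have han : a.toNat < cr.length := by rw [hlen]; omega
  set Xb := PySem.Dict.update crb new_b with hXb
  set mid := PySem.List.pySetD cr b Xb with hmid_def
  have hmid : PySem.List.pyGetD mid a PySem.Dict.empty = cra := by
    rw [hmid_def, PySem.List.pySetD_of_nonneg _ _ hb0, PySem.List.pyGetD_of_nonneg _ _ ha0,
      List.getD_eq_getElem?_getD, List.getElem?_set_ne (fun hh => hton hh.symm),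
      ← List.getD_eq_getElem?_getD, hcra, PySem.List.pyGetD_of_nonneg _ _ ha0]
  set Ya := PySem.Dict.update (PySem.List.pyGetD mid a PySem.Dict.empty) new_a with hYa
  have hlenmid : mid.length = cr.length := by rw [hmid_def, PySem.List.length_pySetD]
  have hgetA : PySem.List.pyGetD (PySem.List.pySetD mid a Ya) a PySem.Dict.empty = Ya := by
    rw [PySem.List.pySetD_of_nonneg _ _ ha0, PySem.List.pyGetD_of_nonneg _ _ ha0,
      List.getD_eq_getElem?_getD, List.getElem?_set_self (by rw [hlenmid]; exact han)]
    rfl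
  have hgetB : PySem.List.pyGetD (PySem.List.pySetD mid a Ya) b PySem.Dict.empty = Xb := by
    rw [hmid_def, PySem.List.pySetD_of_nonneg _ _ hb0, PySem.List.pySetD_of_nonneg _ _ ha0,
      PySem.List.pyGetD_of_nonneg _ _ hb0]
    exact getD_set_set_fst cr b.toNat a.toNat Xb Ya PySem.Dict.empty hton hbn
  have hgetO : ∀ v : Int, 0 ≤ v → v ≠ a → v ≠ b →
      PySem.List.pyGetD (PySem.List.pySetD mid a Ya) v PySem.Dict.empty
        = PySem.List.pyGetD cr v PySem.Dict.empty := by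
    intro v hv hva hvb
    rw [hmid_def, PySem.List.pySetD_of_nonneg _ _ hb0, PySem.List.pySetD_of_nonneg _ _ ha0,
      PySem.List.pyGetD_of_nonneg _ _ hv, PySem.List.pyGetD_of_nonneg _ _ hv]
    exact getD_set_set_other cr b.toNat a.toNat v.toNat Xb Ya PySem.Dict.empty
      (by omega) (by omega)
  show InvCR n (PySem.List.pySetD mid a Ya)
    (PySem.Dict.update D (D.items.foldl _ []))
  refine ⟨by rw [PySem.List.length_pySetD, hlenmid, hlen], PySem.Dict.nodup_keys_update _ _ hnd, ?_⟩
  intro v hv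
  show projD v ((PySem.Dict.mk D.items).update (D.items.foldl _ [])).items = _
  rw [hadds, projD_update]
  by_cases hva : v = a
  · subst hva
    rw [hproja, hproj v ha0, hgetA, hYa, hmid]
  · by_cases hvb : v = b
    · subst hvb
      rw [hprojb, hproj v hb0, hgetB, hXb]
    · rw [hprojo v hva hvb, hproj v hv]
      show (PySem.List.pyGetD cr v PySem.Dict.empty).items = _
      rw [hgetO v hv hva hvb]

theorem fold_inv (n : Int) :
    ∀ (l : List (Int × Int × Int)),
      (∀ e ∈ l, 0 ≤ e.2.1 ∧ e.2.1 < n ∧ 0 ≤ e.2.2 ∧ e.2.2 < n ∧ e.2.1 ≠ e.2.2) →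
      ∀ cr D, InvCR n cr D → InvCR n (l.foldl stepA cr) (l.foldl stepB D) := by
  intro l
  induction l with
  | nil => intro _ cr D h; exact h
  | cons e es ih =>
    intro hbnd cr D h
    obtain ⟨t, a, b⟩ := e
    obtain ⟨h1, h2, h3, h4, h5⟩ := hbnd _ (List.mem_cons_self)
    exact ih (fun e he => hbnd e (List.mem_cons_of_mem _ he)) _ _
      (step_inv n cr D t a b h h1 h2 h3 h4 h5)

theorem collect_eq (n : Int) (cr : List (PySem.Dict Int Int)) (D : PySem.Dict (Int × Int) Int)
    (h : InvCR n cr D) : collectA n cr = collectB n D := by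
  obtain ⟨_, _, hproj⟩ := h
  unfold collectA collectB
  refine (PySem.List.foldl_congr_mem _ _ _ _ ?_).symm
  intro acc v hvmem
  have hv : 0 ≤ v := ((PySem.List.mem_pyRange_one).1 hvmem).1
  -- B's guarded scan over all keys = A's scan over the v-th dict's keys
  have h1 : D.keys.foldl (fun acc ws =>
      if ws.1 == v && ws.2 != v then PySem.Set.add acc (ws.2, v) else acc) acc
      = (D.keys.filter (fun ws => ws.1 == v)).foldl (fun acc ws =>
          if ws.2 != v then PySem.Set.add acc (ws.2, v) else acc) acc := by
    rw [List.foldl_filter]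
    refine PySem.List.foldl_congr_mem _ _ _ _ ?_
    intro acc ws _
    by_cases hw : ws.1 == v <;> by_cases hs : ws.2 != v <;> simp [hw, hs]
  have h2 : (D.keys.filter (fun ws => ws.1 == v)).map (fun ws => ws.2)
      = (PySem.List.pyGetD cr v PySem.Dict.empty).keys := by
    have hk : D.keys = D.items.map (fun p => p.1) := rfl
    rw [hk, List.filter_map, List.map_map]
    have : (PySem.List.pyGetD cr v PySem.Dict.empty).keys
        = (PySem.List.pyGetD cr v PySem.Dict.empty).items.map (fun p => p.1) := rfl
    rw [this, ← hproj v hv]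
    unfold projD
    rw [List.map_map]
    rfl
  rw [h1, ← h2, List.foldl_map]

theorem mem_sortedTriples (k : Int) (M : List (List Int)) (edge_set : List (Int × Int))
    (hb : ∀ e ∈ edge_set, 0 ≤ e.1 ∧ e.1 < k ∧ 0 ≤ e.2 ∧ e.2 < k) :
    ∀ e ∈ sortedTriples k M edge_set,
      0 ≤ e.2.1 ∧ e.2.1 < 2 * k ∧ 0 ≤ e.2.2 ∧ e.2.2 < 2 * k ∧ e.2.1 ≠ e.2.2 := by
  intro e he
  rw [sortedTriples, PySem.List.mem_sorted, List.mem_map] at he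
  obtain ⟨p, hp, rfl⟩ := he
  obtain ⟨h1, h2, h3, h4⟩ := hb p hp
  dsimp only
  exact ⟨by omega, by omega, by omega, by omega, by omega⟩

theorem core_eq (k : Int) (edge_set : List (Int × Int)) (M : List (List Int))
    (hb : ∀ e ∈ edge_set, 0 ≤ e.1 ∧ e.1 < k ∧ 0 ≤ e.2 ∧ e.2 < k) :
    compute_reachability k edge_set M = reach_flat k edge_set M := by
  have hA : compute_reachability k edge_set M
      = collectA (2 * k) ((sortedTriples k M edge_set).foldl stepA
          ((PySem.List.pyRange 0 (2 * k)).foldl initF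
            ((PySem.List.pyRange 0 (2 * k)).map (fun _ => PySem.Dict.empty)))) := rfl
  have hB : reach_flat k edge_set M
      = collectB (2 * k) ((sortedTriples k M edge_set).foldl stepB
          (PySem.Dict.mk ((PySem.List.pyRange 0 (2 * k)).map (fun v => ((v, v), (0 : Int)))))) := rfl
  rw [hA, hB, init_cr]
  exact collect_eq _ _ _
    (fold_inv (2 * k) _ (mem_sortedTriples k M edge_set hb) _ _ (init_inv (2 * k)))

theorem findSome?_congr_mem {α β : Type} (l : List α) (f g : α → Option β)
    (h : ∀ x ∈ l, f x = g x) : l.findSome? f = l.findSome? g := by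
  induction l with
  | nil => rfl
  | cons x xs ih =>
    rw [List.findSome?_cons, List.findSome?_cons, h x (by simp)]
    exact match g x with
      | some b => rfl
      | none => ih (fun y hy => h y (by simp [hy]))

theorem find?_flatMap {α β : Type} (l : List α) (f : α → List β) (p : β → Bool) :
    (l.flatMap f).find? p = l.findSome? (fun a => (f a).find? p) := by
  induction l with
  | nil => rfl
  | cons x xs ih =>
    rw [List.flatMap_cons, List.find?_append, List.findSome?_cons, ih]
    cases List.find? p (f x) <;> rfl

theorem find?_congr_mem {α : Type} (l : List α) (p q : α → Bool)
    (h : ∀ x ∈ l, p x = q x) : l.find? p = l.find? q := by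
  induction l with
  | nil => rfl
  | cons x xs ih =>
    simp only [List.find?_cons, h x (by simp)]
    split <;> [rfl; exact ih (fun y hy => h y (by simp [hy]))]

theorem mem_pyCombinations_subset {α : Type} :
    ∀ (l : List α) (r : Nat) (c : List α), c ∈ pyCombinations l r → ∀ x ∈ c, x ∈ l := by
  intro l
  induction l with
  | nil =>
    intro r c hc
    cases r with
    | zero => simp [pyCombinations] at hc; simp [hc]
    | succ r => simp [pyCombinations] at hc
  | cons y ys ih =>
    intro r c hc
    cases r with
    | zero => simp [pyCombinations] at hc; simp [hc]
    | succ r =>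
      simp only [pyCombinations, List.mem_append, List.mem_map] at hc
      rcases hc with ⟨c', hc', rfl⟩ | hc
      · intro x hx
        rcases List.mem_cons.1 hx with rfl | hx
        · exact List.mem_cons_self
        · exact List.mem_cons_of_mem _ (ih r c' hc' x hx)
      · exact fun x hx => List.mem_cons_of_mem _ (ih (r + 1) c hc x hx)

theorem mem_allEdgesList (k : Int) (e : Int × Int) (he : e ∈ allEdgesList k) :
    0 ≤ e.1 ∧ e.1 < k ∧ 0 ≤ e.2 ∧ e.2 < k := by
  simp only [allEdgesList, List.mem_flatMap, List.mem_map] at he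
  obtain ⟨i, hi, j, hj, rfl⟩ := he
  rw [PySem.List.mem_pyRange_one] at hi hj
  exact ⟨hi.1, hi.2, hj.1, hj.2⟩

-- ===== VERDICT (by name: the statement is the Claim_ definition above) =====
theorem find_minimum_spanner_brute_spec : Claim_equal_find_minimum_spanner_brute := by
  intro k M _ _
  unfold Spec_find_minimum_spanner_brute
  unfold find_minimum_spanner_brute find_minimum_spanner_brute_alt full_reachability
  dsimp only
  have hofl : ∀ c : List (Int × Int), (∀ x ∈ c, x ∈ allEdgesList k) →
      compute_reachability k (PySem.Set.ofList c) M = reach_flat k (PySem.Set.ofList c) M := by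
    intro c hc
    refine core_eq _ _ _ (fun e he => mem_allEdgesList k e ?_)
    exact hc e ((PySem.Set.mem_ofList _ _).1 he)
  have hfull : compute_reachability k (PySem.Set.ofList (allEdgesList k)) M
      = reach_flat k (PySem.Set.ofList (allEdgesList k)) M := hofl _ (fun x hx => hx)
  have hmain : (PySem.List.pyRange 1 (k * k + 1)).findSome? (fun size =>
        (pyCombinations (allEdgesList k) size.toNat).find? (fun combo =>
          PySem.Set.equal (compute_reachability k (PySem.Set.ofList combo) M)
            (reach_flat k (PySem.Set.ofList (allEdgesList k)) M)))
      = ((PySem.List.pyRange 1 (k * k + 1)).flatMap (fun size => pyCombinations (allEdgesList k) size.toNat)).find?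
          (fun c => PySem.Set.equal (reach_flat k (PySem.Set.ofList c) M)
            (reach_flat k (PySem.Set.ofList (allEdgesList k)) M)) := by
    rw [find?_flatMap]
    refine findSome?_congr_mem _ _ _ (fun size _ => find?_congr_mem _ _ _ (fun c hc => ?_))
    rw [hofl c (mem_pyCombinations_subset _ _ c hc)]
  rw [hfull, hmain]
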